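-- pv_equiv track=rewrite | github.com/Jiganesh/Loads-Of-Logic | arrays/maximizeDistanceToClosestPerson.py | maxDistToClosestApproach2
-- ===== SOURCE A (Python) =====
-- def maxDistToClosestApproach2(seats):
--     """
--     :type seats: List[int]
--     :rtype: int
--     """
--     seatsAvailable = len(seats)
--     firstOccupiedSeat = -1
--     countOfZeroBetweenTwoSeats = 0
--     maximumDistance = float('-inf')
--
--     for i in range(seatsAvailable):
--
--         if seats[i]==0:
--             countOfZeroBetweenTwoSeats+=1
--         else:
--             if firstOccupiedSeat == -1 :
--                 maximumDistance = countOfZeroBetweenTwoSeats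
--                 firstOccupiedSeat =i
--             else :
--                 maximumDistance = max(maximumDistance,(countOfZeroBetweenTwoSeats+1)//2)
--             countOfZeroBetweenTwoSeats=0
--
--     return max(maximumDistance, countOfZeroBetweenTwoSeats)
--
--     '''
--     Example :
--
--     1 0 0 0 0 1 0
--
--     We record the first occurence of one and count the zeros till next occurence
--     We find the middle position in between next occurence and note maximum in it
--
--     edge cases :
--
--     0,0,0,0,1
--     Till we find our first occurence of one we substitue the count in maximum distance
--     Makes sense right
--
--     1,0,0,0,0,0
--     At last we check the maximum value so that we can get rightmost seat
--
--     '''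
-- ===== SOURCE B (Python) =====
-- def maxDistToClosestApproach2(seats):
--     """
--     :type seats: List[int]
--     :rtype: int
--     """
--     pos = [i for i, s in enumerate(seats) if s != 0]
--     if not pos:
--         return len(seats)
--     best = max(pos[0], len(seats) - 1 - pos[-1])
--     for a, b in zip(pos, pos[1:]):
--         best = max(best, (b - a) // 2)
--     return best
-- ===== Notes on version B (the rewrite author's own statement) =====
-- stated objective: simpler
-- what changed: Replaces A's single scan with a running zero-counter, first-seat flag and -inf sentinel by first collecting the occupied positions and taking the max of the leading distance, trailing distance and halved adjacent gaps.
import Mathlib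
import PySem

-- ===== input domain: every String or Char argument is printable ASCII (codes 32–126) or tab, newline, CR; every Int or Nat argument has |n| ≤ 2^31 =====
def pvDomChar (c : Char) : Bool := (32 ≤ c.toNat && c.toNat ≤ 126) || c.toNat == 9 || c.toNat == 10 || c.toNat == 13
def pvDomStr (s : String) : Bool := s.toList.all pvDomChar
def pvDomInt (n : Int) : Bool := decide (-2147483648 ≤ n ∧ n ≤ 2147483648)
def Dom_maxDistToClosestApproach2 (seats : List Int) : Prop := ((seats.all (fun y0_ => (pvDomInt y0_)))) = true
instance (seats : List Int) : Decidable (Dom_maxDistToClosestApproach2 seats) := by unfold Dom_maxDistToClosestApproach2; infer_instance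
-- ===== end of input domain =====

-- B replaces A's running zero-counter/first-seat-flag scan by a list of occupied positions and
-- a fold over adjacent gaps (objective: simpler decomposition, same O(n) cost).

-- ===== PORT A =====
-- state = (firstOccupiedSeat, countOfZeroBetweenTwoSeats, maximumDistance);
-- maximumDistance : Option Int, none = float('-inf').
def maxDistToClosestApproach2 (seats : List Int) : Int :=
  let st := (PySem.List.pyRange 0 (PySem.List.len seats) 1).foldl
    (fun (s : Int × Int × Option Int) i =>
      if PySem.List.pyGetD seats i 0 = 0 then (s.1, s.2.1 + 1, s.2.2)
      else if s.1 = -1 then (i, 0, some s.2.1)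
      else (s.1, 0, some (max (s.2.2.getD 0) (PySem.Int.floordiv (s.2.1 + 1) 2))))
    (-1, 0, none)
  -- max(maximumDistance, count): max(-inf, c) = c
  match st.2.2 with
  | none => st.2.1
  | some m => max m st.2.1

-- ===== PORT B =====
def maxDistToClosestApproach2_alt (seats : List Int) : Int :=
  let pos : List Int := (PySem.List.enumerate seats 0).foldr
    (fun p acc => if p.2 ≠ 0 then p.1 :: acc else acc) []
  match pos with
  | [] => PySem.List.len seats
  | p0 :: rest =>
    let best := max p0 (PySem.List.len seats - 1 - List.getLastD rest p0)
    ((p0 :: rest).zip rest).foldl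
      (fun b pr => max b (PySem.Int.floordiv (pr.2 - pr.1) 2)) best

-- ===== PRECONDITION & SPEC =====
def Spec_maxDistToClosestApproach2 (seats : List Int) (out : Int) : Prop := out = maxDistToClosestApproach2_alt seats
instance (seats : List Int) (out : Int) : Decidable (Spec_maxDistToClosestApproach2 seats out) := by unfold Spec_maxDistToClosestApproach2; infer_instance

-- ===== CLAIM (what is proved, stated in full; the proofs are below) =====
def Claim_equal_maxDistToClosestApproach2 : Prop := ∀ (seats : List Int), Dom_maxDistToClosestApproach2 seats → Spec_maxDistToClosestApproach2 seats (maxDistToClosestApproach2 seats)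

-- ===== LEMMAS AND PROOFS =====

-- A's loop body, on an (index, value) pair.
def pvStepA (s : Int × Int × Option Int) (p : Int × Int) : Int × Int × Option Int :=
  if p.2 = 0 then (s.1, s.2.1 + 1, s.2.2)
  else if s.1 = -1 then (p.1, 0, some s.2.1)
  else (s.1, 0, some (max (s.2.2.getD 0) (PySem.Int.floordiv (s.2.1 + 1) 2)))

def pvFinish (st : Int × Int × Option Int) : Int :=
  match st.2.2 with
  | none => st.2.1
  | some m => max m st.2.1

-- A's loop after the first occupied seat was found: only values matter.
def pvLoop1 : List Int → Int → Int → Int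
  | [], c, m => max m c
  | x :: xs, c, m =>
    if x = 0 then pvLoop1 xs (c + 1) m
    else pvLoop1 xs 0 (max m (PySem.Int.floordiv (c + 1) 2))

-- A's whole run: leading-zero phase, then pvLoop1.
def pvARun : List Int → Int → Int
  | [], c => c
  | x :: xs, c => if x = 0 then pvARun xs (c + 1) else pvLoop1 xs 0 c

-- B's positions list, from offset s.
def pvPosF : List Int → Int → List Int
  | [], _ => []
  | x :: xs, s => if x ≠ 0 then s :: pvPosF xs (s + 1) else pvPosF xs (s + 1)

-- B's gap scan in recursive form: previous position p, best b, total length n.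
def pvBTail : List Int → Int → Int → Int → Int
  | [], p, b, n => max b (n - 1 - p)
  | q :: qs, p, b, n => pvBTail qs q (max b (PySem.Int.floordiv (q - p) 2)) n

lemma pvPosF_eq_foldr (l : List Int) (s : Int) :
    pvPosF l s = (PySem.List.enumerate l s).foldr (fun p acc => if p.2 ≠ 0 then p.1 :: acc else acc) [] := by
  induction l generalizing s with
  | nil => simp [pvPosF, PySem.List.enumerate_nil]
  | cons x xs ih => simp [pvPosF, PySem.List.enumerate_cons, ih]

lemma pvFoldl_phase1 (l : List Int) : ∀ (s f c m : Int), f ≠ -1 →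
    pvFinish ((PySem.List.enumerate l s).foldl pvStepA (f, c, some m)) = pvLoop1 l c m := by
  induction l with
  | nil => intro s f c m hf; simp [PySem.List.enumerate_nil, pvFinish, pvLoop1]
  | cons x xs ih =>
    intro s f c m hf
    rw [PySem.List.enumerate_cons]
    by_cases hx : x = 0
    · simp only [List.foldl_cons, pvStepA, pvLoop1, hx, if_pos]
      exact ih (s + 1) f (c + 1) m hf
    · simp only [List.foldl_cons, pvStepA, pvLoop1, hx, reduceIte, if_neg hf, Option.getD_some]
      exact ih (s + 1) f 0 (max m (PySem.Int.floordiv (c + 1) 2)) hf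

lemma pvFoldl_phase0 (l : List Int) : ∀ (s c : Int), 0 ≤ s →
    pvFinish ((PySem.List.enumerate l s).foldl pvStepA (-1, c, none)) = pvARun l c := by
  induction l with
  | nil => intro s c _; simp [PySem.List.enumerate_nil, pvFinish, pvARun]
  | cons x xs ih =>
    intro s c hs
    rw [PySem.List.enumerate_cons]
    by_cases hx : x = 0
    · simp only [List.foldl_cons, pvStepA, pvARun, hx, reduceIte]
      exact ih (s + 1) (c + 1) (by omega)
    · simp only [List.foldl_cons, pvStepA, pvARun, hx, reduceIte]
      exact pvFoldl_phase1 xs (s + 1) s 0 c (by omega)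

lemma pvA_eq_aRun (seats : List Int) : maxDistToClosestApproach2 seats = pvARun seats 0 := by
  have he := PySem.List.enumerate_eq_map_pyRange (xs := seats) (d := (0 : Int))
  have : (PySem.List.enumerate seats 0).foldl pvStepA ((-1 : Int), (0 : Int), (none : Option Int))
      = (PySem.List.pyRange 0 (PySem.List.len seats) 1).foldl
          (fun (s : Int × Int × Option Int) i =>
            if PySem.List.pyGetD seats i 0 = 0 then (s.1, s.2.1 + 1, s.2.2)
            else if s.1 = -1 then (i, 0, some s.2.1)
            else (s.1, 0, some (max (s.2.2.getD 0) (PySem.Int.floordiv (s.2.1 + 1) 2))))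
          (-1, 0, none) := by
    rw [he, List.foldl_map]; rfl
  rw [maxDistToClosestApproach2, ← this, ← pvFoldl_phase0 seats 0 0 le_rfl]; rfl

-- the bridge between A's recursion and B's gap scan
lemma pvLoop1_eq_bTail (l : List Int) : ∀ (p c b s n : Int), s = p + c + 1 → n = s + l.length →
    pvLoop1 l c b = pvBTail (pvPosF l s) p b n := by
  induction l with
  | nil =>
    intro p c b s n hs hn
    simp only [List.length_nil] at hn
    simp only [pvLoop1, pvPosF, pvBTail]
    omega
  | cons x xs ih =>
    intro p c b s n hs hn
    simp only [List.length_cons] at hn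
    by_cases hx : x = 0
    · simp only [pvLoop1, pvPosF, hx, reduceIte, ite_not]
      exact ih p (c + 1) b (s + 1) n (by omega) (by omega)
    · simp only [pvLoop1, pvPosF, hx, ite_not, reduceIte]
      simp only [pvBTail]
      have h1 : s - p = c + 1 := by omega
      rw [h1]
      exact ih s 0 (max b (PySem.Int.floordiv (c + 1) 2)) (s + 1) n (by omega) (by omega)

lemma pvARun_eq_match (l : List Int) : ∀ (c n : Int), n = c + l.length →
    pvARun l c = (match pvPosF l c with
      | [] => n
      | q0 :: qs => pvBTail qs q0 q0 n) := by
  induction l with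
  | nil =>
    intro c n hn
    simp only [List.length_nil] at hn
    simp only [pvARun, pvPosF]
    omega
  | cons x xs ih =>
    intro c n hn
    simp only [List.length_cons] at hn
    by_cases hx : x = 0
    · simp only [pvARun, pvPosF, hx, reduceIte, ite_not]
      exact ih (c + 1) n (by omega)
    · simp only [pvARun, pvPosF, hx, ite_not, reduceIte]
      exact pvLoop1_eq_bTail xs c 0 c (c + 1) n (by omega) (by omega)

lemma pvBTail_eq_zipfold (qs : List Int) : ∀ (p b n : Int),
    pvBTail qs p b n = ((p :: qs).zip qs).foldl
      (fun b pr => max b (PySem.Int.floordiv (pr.2 - pr.1) 2))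
      (max b (n - 1 - List.getLastD qs p)) := by
  induction qs with
  | nil => intro p b n; simp [pvBTail]
  | cons q qs' ih =>
    intro p b n
    rw [pvBTail, ih q (max b (PySem.Int.floordiv (q - p) 2)) n]
    simp only [List.zip_cons_cons, List.foldl_cons, List.getLastD_cons]
    congr 1
    rw [max_comm (max b (PySem.Int.floordiv (q - p) 2)) (n - 1 - List.getLastD qs' q),
        ← max_assoc, max_comm (n - 1 - List.getLastD qs' q) b]

lemma pvB_eq_match (seats : List Int) :
    maxDistToClosestApproach2_alt seats = (match pvPosF seats 0 with
      | [] => (seats.length : Int)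
      | q0 :: qs => pvBTail qs q0 q0 (seats.length : Int)) := by
  rw [maxDistToClosestApproach2_alt, ← pvPosF_eq_foldr]
  cases h : pvPosF seats 0 with
  | nil => simp [PySem.List.len]
  | cons p0 rest =>
    dsimp only
    rw [pvBTail_eq_zipfold rest p0 p0 ((seats.length : Int))]
    simp [PySem.List.len]

-- ===== VERDICT (by name: the statement is the Claim_ definition above) =====
theorem maxDistToClosestApproach2_spec : Claim_equal_maxDistToClosestApproach2 := by
  intro seats _
  unfold Spec_maxDistToClosestApproach2
  rw [pvA_eq_aRun, pvARun_eq_match seats 0 (seats.length : Int) (by omega), pvB_eq_match]
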